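-- pv_equiv track=rewrite | github.com/franklucky001/simple-lexicon | utils/simple_lexicon_data_process.py | make_lexicon_group
-- ===== SOURCE A (Python) =====
-- def make_lexicon_group(offset, ranges):
--     group_b = filter(lambda item: item[1] == offset and item[2] > offset+1, ranges)
--     group_m = filter(lambda item: item[1] < offset and item[2] > offset+1, ranges)
--     group_e = filter(lambda item: item[1] < offset and item[2] == offset+1, ranges)
--     group_s = filter(lambda item: item[1] == offset and item[2] == offset+1, ranges)
--     words_b = [g[0] for g in group_b]
--     words_m = [g[0] for g in group_m]
--     words_e = [g[0] for g in group_e]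
--     words_s = [g[0] for g in group_s]
--     lexicon_group = '|'.join([','.join(words_g) for words_g in [words_b, words_m, words_e, words_s]])
--     return lexicon_group
-- ===== SOURCE B (Python) =====
-- def make_lexicon_group(offset, ranges):
--     words_b, words_m, words_e, words_s = [], [], [], []
--     for item in ranges:
--         if item[1] == offset and item[2] > offset + 1:
--             words_b.append(item[0])
--         elif item[1] < offset and item[2] > offset + 1:
--             words_m.append(item[0])
--         elif item[1] < offset and item[2] == offset + 1:
--             words_e.append(item[0])
--         elif item[1] == offset and item[2] == offset + 1:
--             words_s.append(item[0])
--     return '|'.join([','.join(g) for g in [words_b, words_m, words_e, words_s]])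
-- ===== Notes on version B (the rewrite author's own statement) =====
-- stated objective: simpler
-- what changed: Replaces four separate filter passes over ranges with one loop that classifies each item into the four buckets via an if/elif chain (items matching no case are skipped), then joins as before.
import Mathlib
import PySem

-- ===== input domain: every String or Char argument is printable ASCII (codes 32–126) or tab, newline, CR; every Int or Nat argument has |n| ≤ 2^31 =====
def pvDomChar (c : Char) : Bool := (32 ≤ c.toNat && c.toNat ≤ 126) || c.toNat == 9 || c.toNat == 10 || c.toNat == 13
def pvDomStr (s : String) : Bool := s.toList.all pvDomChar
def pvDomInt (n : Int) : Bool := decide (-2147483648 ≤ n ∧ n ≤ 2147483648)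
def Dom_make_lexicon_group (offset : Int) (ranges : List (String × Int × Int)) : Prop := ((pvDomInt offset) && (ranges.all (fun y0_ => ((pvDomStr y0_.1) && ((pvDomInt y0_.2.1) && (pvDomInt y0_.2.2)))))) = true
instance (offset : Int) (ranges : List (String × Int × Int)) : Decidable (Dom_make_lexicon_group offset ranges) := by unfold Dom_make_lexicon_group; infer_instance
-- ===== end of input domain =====

-- B replaces A's four filter passes by a single classifying loop; objective: simpler.

-- ===== PORT A =====
def make_lexicon_group (offset : Int) (ranges : List (String × Int × Int)) : String :=
  let group_b := ranges.filter (fun item => item.2.1 == offset && decide (item.2.2 > offset + 1))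
  let group_m := ranges.filter (fun item => decide (item.2.1 < offset) && decide (item.2.2 > offset + 1))
  let group_e := ranges.filter (fun item => decide (item.2.1 < offset) && item.2.2 == offset + 1)
  let group_s := ranges.filter (fun item => item.2.1 == offset && item.2.2 == offset + 1)
  let words_b := group_b.map (fun g => g.1)
  let words_m := group_m.map (fun g => g.1)
  let words_e := group_e.map (fun g => g.1)
  let words_s := group_s.map (fun g => g.1)
  PySem.Str.join "|" ([words_b, words_m, words_e, words_s].map (fun words_g => PySem.Str.join "," words_g))

-- ===== PORT B =====
-- one loop over ranges, classifying each item into four buckets (if/elif chain, no else)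
def pvStep (offset : Int) (acc : List String × List String × List String × List String)
    (item : String × Int × Int) : List String × List String × List String × List String :=
  let (b, m, e, s) := acc
  if item.2.1 == offset && decide (item.2.2 > offset + 1) then (b ++ [item.1], m, e, s)
  else if decide (item.2.1 < offset) && decide (item.2.2 > offset + 1) then (b, m ++ [item.1], e, s)
  else if decide (item.2.1 < offset) && item.2.2 == offset + 1 then (b, m, e ++ [item.1], s)
  else if item.2.1 == offset && item.2.2 == offset + 1 then (b, m, e, s ++ [item.1])
  else (b, m, e, s)

def make_lexicon_group_alt (offset : Int) (ranges : List (String × Int × Int)) : String :=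
  let acc := ranges.foldl (pvStep offset) ([], [], [], [])
  PySem.Str.join "|" ([acc.1, acc.2.1, acc.2.2.1, acc.2.2.2].map (fun g => PySem.Str.join "," g))

-- ===== PRECONDITION & SPEC =====
def Spec_make_lexicon_group (offset : Int) (ranges : List (String × Int × Int)) (out : String) : Prop := out = make_lexicon_group_alt offset ranges
instance (offset : Int) (ranges : List (String × Int × Int)) (out : String) : Decidable (Spec_make_lexicon_group offset ranges out) := by unfold Spec_make_lexicon_group; infer_instance

-- ===== CLAIM (what is proved, stated in full; the proofs are below) =====
def Claim_equal_make_lexicon_group : Prop := ∀ (offset : Int) (ranges : List (String × Int × Int)), Dom_make_lexicon_group offset ranges → Spec_make_lexicon_group offset ranges (make_lexicon_group offset ranges)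

-- ===== LEMMAS AND PROOFS =====

-- the single-pass fold accumulates exactly the four filtered-and-projected lists
theorem pv_fold_eq (offset : Int) (ranges : List (String × Int × Int))
    (b m e s : List String) :
    ranges.foldl (pvStep offset) (b, m, e, s)
    = (b ++ (ranges.filter (fun item => item.2.1 == offset && decide (item.2.2 > offset + 1))).map (fun g => g.1),
       m ++ (ranges.filter (fun item => decide (item.2.1 < offset) && decide (item.2.2 > offset + 1))).map (fun g => g.1),
       e ++ (ranges.filter (fun item => decide (item.2.1 < offset) && item.2.2 == offset + 1)).map (fun g => g.1),
       s ++ (ranges.filter (fun item => item.2.1 == offset && item.2.2 == offset + 1)).map (fun g => g.1)) := by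
  induction ranges generalizing b m e s with
  | nil => simp
  | cons hd tl ih =>
    obtain ⟨w, lo, hi⟩ := hd
    rw [List.foldl_cons]
    by_cases h1 : lo = offset ∧ hi > offset + 1
    · have c1 : (lo == offset && decide (hi > offset + 1)) = true := by
          simp only [Bool.and_eq_true, Bool.and_eq_false_iff, beq_iff_eq, beq_eq_false_iff_ne, decide_eq_true_eq, decide_eq_false_iff_not, ne_eq]
          omega
      have c2 : (decide (lo < offset) && decide (hi > offset + 1)) = false := by
          simp only [Bool.and_eq_true, Bool.and_eq_false_iff, beq_iff_eq, beq_eq_false_iff_ne, decide_eq_true_eq, decide_eq_false_iff_not, ne_eq]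
          omega
      have c3 : (decide (lo < offset) && (hi == offset + 1)) = false := by
          simp only [Bool.and_eq_true, Bool.and_eq_false_iff, beq_iff_eq, beq_eq_false_iff_ne, decide_eq_true_eq, decide_eq_false_iff_not, ne_eq]
          omega
      have c4 : ((lo == offset) && (hi == offset + 1)) = false := by
          simp only [Bool.and_eq_true, Bool.and_eq_false_iff, beq_iff_eq, beq_eq_false_iff_ne, decide_eq_true_eq, decide_eq_false_iff_not, ne_eq]
          omega
      have hstep : pvStep offset (b, m, e, s) (w, lo, hi) = (b ++ [w], m, e, s) := by
        simp [pvStep, c1, c2, c3, c4]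
      rw [hstep, ih]
      simp [List.filter_cons, c1, c2, c3, c4]
    · by_cases h2 : lo < offset ∧ hi > offset + 1
      · have c1 : (lo == offset && decide (hi > offset + 1)) = false := by
            simp only [Bool.and_eq_true, Bool.and_eq_false_iff, beq_iff_eq, beq_eq_false_iff_ne, decide_eq_true_eq, decide_eq_false_iff_not, ne_eq]
            omega
        have c2 : (decide (lo < offset) && decide (hi > offset + 1)) = true := by
            simp only [Bool.and_eq_true, Bool.and_eq_false_iff, beq_iff_eq, beq_eq_false_iff_ne, decide_eq_true_eq, decide_eq_false_iff_not, ne_eq]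
            omega
        have c3 : (decide (lo < offset) && (hi == offset + 1)) = false := by
            simp only [Bool.and_eq_true, Bool.and_eq_false_iff, beq_iff_eq, beq_eq_false_iff_ne, decide_eq_true_eq, decide_eq_false_iff_not, ne_eq]
            omega
        have c4 : ((lo == offset) && (hi == offset + 1)) = false := by
            simp only [Bool.and_eq_true, Bool.and_eq_false_iff, beq_iff_eq, beq_eq_false_iff_ne, decide_eq_true_eq, decide_eq_false_iff_not, ne_eq]
            omega
        have hstep : pvStep offset (b, m, e, s) (w, lo, hi) = (b, m ++ [w], e, s) := by
          simp [pvStep, c1, c2, c3, c4]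
        rw [hstep, ih]
        simp [List.filter_cons, c1, c2, c3, c4]
      · by_cases h3 : lo < offset ∧ hi = offset + 1
        · have c1 : (lo == offset && decide (hi > offset + 1)) = false := by
              simp only [Bool.and_eq_true, Bool.and_eq_false_iff, beq_iff_eq, beq_eq_false_iff_ne, decide_eq_true_eq, decide_eq_false_iff_not, ne_eq]
              omega
          have c2 : (decide (lo < offset) && decide (hi > offset + 1)) = false := by
              simp only [Bool.and_eq_true, Bool.and_eq_false_iff, beq_iff_eq, beq_eq_false_iff_ne, decide_eq_true_eq, decide_eq_false_iff_not, ne_eq]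
              omega
          have c3 : (decide (lo < offset) && (hi == offset + 1)) = true := by
              simp only [Bool.and_eq_true, Bool.and_eq_false_iff, beq_iff_eq, beq_eq_false_iff_ne, decide_eq_true_eq, decide_eq_false_iff_not, ne_eq]
              omega
          have c4 : ((lo == offset) && (hi == offset + 1)) = false := by
              simp only [Bool.and_eq_true, Bool.and_eq_false_iff, beq_iff_eq, beq_eq_false_iff_ne, decide_eq_true_eq, decide_eq_false_iff_not, ne_eq]
              omega
          have hstep : pvStep offset (b, m, e, s) (w, lo, hi) = (b, m, e ++ [w], s) := by
            simp [pvStep, c1, c2, c3, c4]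
          rw [hstep, ih]
          simp [List.filter_cons, c1, c2, c3, c4]
        · by_cases h4 : lo = offset ∧ hi = offset + 1
          · have c1 : (lo == offset && decide (hi > offset + 1)) = false := by
                simp only [Bool.and_eq_true, Bool.and_eq_false_iff, beq_iff_eq, beq_eq_false_iff_ne, decide_eq_true_eq, decide_eq_false_iff_not, ne_eq]
                omega
            have c2 : (decide (lo < offset) && decide (hi > offset + 1)) = false := by
                simp only [Bool.and_eq_true, Bool.and_eq_false_iff, beq_iff_eq, beq_eq_false_iff_ne, decide_eq_true_eq, decide_eq_false_iff_not, ne_eq]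
                omega
            have c3 : (decide (lo < offset) && (hi == offset + 1)) = false := by
                simp only [Bool.and_eq_true, Bool.and_eq_false_iff, beq_iff_eq, beq_eq_false_iff_ne, decide_eq_true_eq, decide_eq_false_iff_not, ne_eq]
                omega
            have c4 : ((lo == offset) && (hi == offset + 1)) = true := by
                simp only [Bool.and_eq_true, Bool.and_eq_false_iff, beq_iff_eq, beq_eq_false_iff_ne, decide_eq_true_eq, decide_eq_false_iff_not, ne_eq]
                omega
            have hstep : pvStep offset (b, m, e, s) (w, lo, hi) = (b, m, e, s ++ [w]) := by
              simp [pvStep, c1, c2, c3, c4]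
            rw [hstep, ih]
            simp [List.filter_cons, c1, c2, c3, c4]
          · have c1 : (lo == offset && decide (hi > offset + 1)) = false := by
                simp only [Bool.and_eq_true, Bool.and_eq_false_iff, beq_iff_eq, beq_eq_false_iff_ne, decide_eq_true_eq, decide_eq_false_iff_not, ne_eq]
                omega
            have c2 : (decide (lo < offset) && decide (hi > offset + 1)) = false := by
                simp only [Bool.and_eq_true, Bool.and_eq_false_iff, beq_iff_eq, beq_eq_false_iff_ne, decide_eq_true_eq, decide_eq_false_iff_not, ne_eq]
                omega
            have c3 : (decide (lo < offset) && (hi == offset + 1)) = false := by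
                simp only [Bool.and_eq_true, Bool.and_eq_false_iff, beq_iff_eq, beq_eq_false_iff_ne, decide_eq_true_eq, decide_eq_false_iff_not, ne_eq]
                omega
            have c4 : ((lo == offset) && (hi == offset + 1)) = false := by
                simp only [Bool.and_eq_true, Bool.and_eq_false_iff, beq_iff_eq, beq_eq_false_iff_ne, decide_eq_true_eq, decide_eq_false_iff_not, ne_eq]
                omega
            have hstep : pvStep offset (b, m, e, s) (w, lo, hi) = (b, m, e, s) := by
              simp [pvStep, c1, c2, c3, c4]
            rw [hstep, ih]
            simp [List.filter_cons, c1, c2, c3, c4]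

-- ===== VERDICT (by name: the statement is the Claim_ definition above) =====
theorem make_lexicon_group_spec : Claim_equal_make_lexicon_group := by
  intro offset ranges _
  unfold Spec_make_lexicon_group make_lexicon_group make_lexicon_group_alt
  rw [pv_fold_eq]
  simp
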